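-- pv_equiv track=rewrite | github.com/wrigjl/quantumsolver | simon_generator.py | brute_force_simon
-- ===== SOURCE A (Python) =====
-- import math
--
-- def power_of_two_info(n):
--     """Is n a power of 2? If so, which one?"""
--     if n <= 0:
--         return False, None
--
--     # A number is a power of two if it has exactly one bit set
--     if (n & (n - 1)) == 0:
--         # log2 gives the exponent
--         power = int(math.log2(n))
--         return True, power
--     return False, None
--
-- def brute_force_simon(farray):
--     """Brute-force search to find the secret string s given f."""
--
--     def f(x):
--         return farray[x]
--
--     ispower2, nbits = power_of_two_info(len(farray))
--     if not ispower2: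
--         return f"length of function is not power of 2 {len(farray)}"
--
--     fmap = {}
--     for s in range(2**nbits):
--         y = f(s)
--         if y not in fmap:
--             fmap[y] = []
--         fmap[y].append(s)
--
--     # one to one mapping, secret string is all zeros
--     if len(fmap) == 2**nbits:
--         return "".zfill(nbits)
--
--     candidates = set()
--     for ys in fmap.values():
--         if len(ys) != 2:
--             return "invalid f: more than two inputs map to the same output"
--         candidates.add(ys[0] ^ ys[1])
--
--     if len(candidates) != 1:
--         return "invalid f: inconsistent secret strings found"
--     s = candidates.pop()
--     return f"{s:b}".zfill(nbits)
-- ===== SOURCE B (Python) =====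
-- def brute_force_simon(farray):
--     """Brute-force search to find the secret string s given f (sort-and-scan, no dict)."""
--     n = len(farray)
--     if n <= 0 or n & (n - 1) != 0:
--         return f"length of function is not power of 2 {n}"
--     nbits = n.bit_length() - 1
--
--     order = sorted(range(n), key=lambda i: farray[i])
--     runs = []
--     for i in order:
--         if runs and farray[runs[-1][-1]] == farray[i]:
--             runs[-1].append(i)
--         else:
--             runs.append([i])
--
--     if len(runs) == n:
--         return "0" * nbits
--
--     xors = set()
--     for run in runs:
--         if len(run) != 2:
--             return "invalid f: more than two inputs map to the same output"
--         xors.add(run[0] ^ run[1])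
--
--     if len(xors) != 1:
--         return "invalid f: inconsistent secret strings found"
--     s = xors.pop()
--     return f"{s:b}".zfill(nbits)
-- ===== Notes on version B (the rewrite author's own statement) =====
-- stated objective: alternative
-- what changed: Replaces the dict-based grouping (value -> index list, then validate the dict's groups) by a sort-and-scan: sort the indices by output value and split the sorted order into adjacent equal-value runs, validating the runs; no dictionary is built.
import Mathlib
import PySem

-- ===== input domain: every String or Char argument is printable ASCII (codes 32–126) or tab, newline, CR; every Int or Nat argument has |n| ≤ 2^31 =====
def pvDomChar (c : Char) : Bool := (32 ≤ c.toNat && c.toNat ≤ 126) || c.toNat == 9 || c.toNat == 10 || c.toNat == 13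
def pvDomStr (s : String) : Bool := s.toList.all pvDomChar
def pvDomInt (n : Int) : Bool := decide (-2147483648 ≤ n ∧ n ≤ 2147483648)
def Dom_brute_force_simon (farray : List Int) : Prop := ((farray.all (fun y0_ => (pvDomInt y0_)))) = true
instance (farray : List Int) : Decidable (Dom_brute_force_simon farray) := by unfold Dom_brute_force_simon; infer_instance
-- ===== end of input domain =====

-- B replaces A's dict-based grouping by sorting the indices by output value and
-- scanning adjacent equal-value runs (alternative algorithm, no dictionary).

-- shared helpers: both Pythons contain the IDENTICAL lines
--   `for …: if len(…) != 2: return "invalid f: …"; <set>.add(a ^ b)`  and  f"{s:b}"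
-- f"{s:b}" (binary digits of s; both programs only format a nonnegative s); fuel = m
def pyBinAux : Nat → Nat → List Char
  | 0, _ => []
  | f+1, m => if m = 0 then [] else pyBinAux f (m/2) ++ [if m % 2 = 1 then '1' else '0']

def pyBin (s : Int) : String :=
  if s = 0 then "0" else String.ofList (pyBinAux s.toNat s.toNat)

-- the common validation loop: groups must have size 2, collect ys[0] ^ ys[1]; none = early error return
def simonXorLoop : List (List Int) → PySem.Set Int → Option (PySem.Set Int)
  | [], cand => some cand
  | ys :: rest, cand =>
    if (ys.length : Int) ≠ 2 then none
    else simonXorLoop rest (PySem.Set.add cand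
      (PySem.Int.bxor ((PySem.List.pyGet? ys 0).getD 0) ((PySem.List.pyGet? ys 1).getD 0)))

-- ===== PORT A =====
def power_of_two_info (n : Int) : Bool × Option Int :=
  if n ≤ 0 then (false, none)
  else if PySem.Int.band n (n - 1) == 0 then
    -- int(math.log2(n)) is exact here: n has exactly one bit set
    (true, some ((Nat.log2 n.toNat : Nat) : Int))
  else (false, none)

def brute_force_simon (farray : List Int) : String :=
  match power_of_two_info (farray.length : Int) with
  | (false, _) => "length of function is not power of 2 " ++ PySem.Int.toStr (farray.length : Int)
  | (true, nb) =>
    let nbits : Int := nb.getD 0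
    let fmap : PySem.Dict Int (List Int) :=
      (PySem.List.pyRange 0 ((2:Int)^nbits.toNat) 1).foldl
        (fun d s =>
          let y := (PySem.List.pyGet? farray s).getD 0  -- f(s) = farray[s]; s is always in range here
          let d := if d.contains y then d else d.insert y []  -- if y not in fmap: fmap[y] = []
          d.modify y [] (fun l => l ++ [s]))                  -- fmap[y].append(s)
        PySem.Dict.empty
    if (fmap.size : Int) == (2:Int)^nbits.toNat then PySem.Str.zfill "" nbits
    else
      match simonXorLoop fmap.values PySem.Set.empty with
      | none => "invalid f: more than two inputs map to the same output"
      | some candidates =>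
        if (candidates.length : Int) ≠ 1 then "invalid f: inconsistent secret strings found"
        else PySem.Str.zfill (pyBin (candidates.headD 0)) nbits  -- set.pop() on a singleton set

-- ===== PORT B =====
def brute_force_simon_alt (farray : List Int) : String :=
  let n : Int := (farray.length : Int)
  if n ≤ 0 || PySem.Int.band n (n - 1) != 0 then
    "length of function is not power of 2 " ++ PySem.Int.toStr n
  else
    let nbits : Int := (PySem.Int.bitLength n : Int) - 1
    let order := PySem.List.sorted (PySem.List.pyRange 0 n 1)
      (fun i => (PySem.List.pyGet? farray i).getD 0)   -- sorted(range(n), key=lambda i: farray[i])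
    let runs : List (List Int) :=
      order.foldl
        (fun runs i =>
          match PySem.List.pyGet? runs (-1) with       -- `if runs and …`: runs[-1] when runs is nonempty
          | some r =>
            if (PySem.List.pyGet? farray ((PySem.List.pyGet? r (-1)).getD 0)).getD 0
                 == (PySem.List.pyGet? farray i).getD 0 then
              runs.dropLast ++ [r ++ [i]]              -- runs[-1].append(i)
            else runs ++ [[i]]
          | none => runs ++ [[i]])
        []
    if (runs.length : Int) == n then String.ofList (PySem.List.pyRepeat ['0'] nbits)  -- "0" * nbits
    else
      match simonXorLoop runs PySem.Set.empty with
      | none => "invalid f: more than two inputs map to the same output"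
      | some xors =>
        if (xors.length : Int) ≠ 1 then "invalid f: inconsistent secret strings found"
        else PySem.Str.zfill (pyBin (xors.headD 0)) nbits  -- set.pop() on a singleton set

-- ===== PRECONDITION & SPEC =====
def Spec_brute_force_simon (farray : List Int) (out : String) : Prop := out = brute_force_simon_alt farray
instance (farray : List Int) (out : String) : Decidable (Spec_brute_force_simon farray out) := by unfold Spec_brute_force_simon; infer_instance

-- ===== CLAIM (what is proved, stated in full; the proofs are below) =====
def Claim_equal_brute_force_simon : Prop := ∀ (farray : List Int), Dom_brute_force_simon farray → Spec_brute_force_simon farray (brute_force_simon farray)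

-- ===== LEMMAS AND PROOFS =====
-- ---------- small generic lemmas ----------
theorem pyGet_neg_one {α : Type} (l : List α) : PySem.List.pyGet? l (-1) = l.getLast? := by
  cases l with
  | nil => rfl
  | cons a t => simp [PySem.List.pyGet?, PySem.List.pyIdx?, List.getLast?_eq_getElem?]

theorem modify_step (d : PySem.Dict Int (List Int)) (y : Int) (f : List Int → List Int) :
  ((if d.contains y then d else d.insert y []).modify y [] f) = d.modify y [] f := by
  by_cases h : d.contains y = true
  · simp [h]
  · have h' : d.contains y = false := by simpa using h
    simp only [h', Bool.false_eq_true, if_false, PySem.Dict.modify]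
    rw [PySem.Dict.getD_insert_self, PySem.Dict.insert_insert_self,
        PySem.Dict.getD_of_not_contains _ _ h']

-- ---------- power of two ----------
theorem and_pred_pow2 (m : Nat) (h0 : 0 < m) (h : m &&& (m-1) = 0) : m = 2 ^ Nat.log2 m := by
  induction m using Nat.strong_induction_on with
  | _ m IH =>
    rcases Nat.lt_or_ge m 2 with hm | hm
    · have : m = 1 := by omega
      subst this; decide
    · have heven : m % 2 = 0 := by
        by_contra hodd
        have hodd' : m % 2 = 1 := by omega
        have ha : m / 2 = 0 := by
          apply Nat.eq_of_testBit_eq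
          intro i
          have hbit : (m &&& (m-1)).testBit (i+1) = false := by rw [h]; simp
          rw [Nat.testBit_and, Nat.testBit_add_one, Nat.testBit_add_one] at hbit
          have h1 : (m - 1) / 2 = m / 2 := by omega
          rw [h1, Bool.and_self] at hbit
          simp [hbit]
        omega
      have ha2 : (m / 2) &&& (m / 2 - 1) = 0 := by
        apply Nat.eq_of_testBit_eq
        intro i
        have hbit : (m &&& (m-1)).testBit (i+1) = false := by rw [h]; simp
        rw [Nat.testBit_and, Nat.testBit_add_one, Nat.testBit_add_one] at hbit
        have h1 : (m - 1) / 2 = m / 2 - 1 := by omega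
        rw [h1] at hbit
        simp [Nat.testBit_and, hbit]
      have IH2 := IH (m / 2) (by omega) (by omega) ha2
      have hlog : Nat.log2 m = Nat.log2 (m / 2) + 1 := by
        rw [Nat.log2_def]
        simp [hm]
      rw [hlog, pow_succ]
      omega

theorem bitLength_pow2 (k : Nat) : PySem.Int.bitLength ((2^k : Nat) : Int) = k + 1 := by
  have h1 := PySem.Int.lt_two_pow_bitLength ((2^k : Nat) : Int)
  have h2 := PySem.Int.two_pow_bitLength_le ((2^k : Nat) : Int) (by positivity)
  have habs : ((2^k : Nat) : Int).natAbs = 2^k := by simp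
  rw [habs] at h1 h2
  set b := PySem.Int.bitLength ((2^k : Nat) : Int) with hb
  have hk1 : k < b := (Nat.pow_lt_pow_iff_right (by norm_num)).mp h1
  have hk2 : b - 1 ≤ k := (Nat.pow_le_pow_iff_right (by norm_num)).mp h2
  omega

-- ---------- proof-side views of the two programs ----------
def valOf (fa : List Int) (i : Int) : Int := (PySem.List.pyGet? fa i).getD 0

def vr (fa : List Int) : List Int := PySem.List.pyRange 0 (fa.length : Int) 1

def ordL (fa : List Int) : List Int := PySem.List.sorted (vr fa) (valOf fa)

def KA (fa : List Int) : List Int := PySem.Set.ofList ((vr fa).map (valOf fa))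
def KB (fa : List Int) : List Int := PySem.Set.ofList ((ordL fa).map (valOf fa))
def grpA (fa : List Int) (y : Int) : List Int := (vr fa).filter (fun i => valOf fa i == y)
def grpB (fa : List Int) (y : Int) : List Int := (ordL fa).filter (fun i => valOf fa i == y)

def runStep (fa : List Int) (runs : List (List Int)) (i : Int) : List (List Int) :=
  match PySem.List.pyGet? runs (-1) with
  | some r =>
    if (PySem.List.pyGet? fa ((PySem.List.pyGet? r (-1)).getD 0)).getD 0
         == (PySem.List.pyGet? fa i).getD 0 then
      runs.dropLast ++ [r ++ [i]]
    else runs ++ [[i]]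
  | none => runs ++ [[i]]

def xr (g : List Int) : Int :=
  PySem.Int.bxor ((PySem.List.pyGet? g 0).getD 0) ((PySem.List.pyGet? g 1).getD 0)

-- ---------- A side: the dict fold ----------
def dictFold (fa : List Int) (pr : List Int) : PySem.Dict Int (List Int) :=
  pr.foldl (fun d s =>
    let y := (PySem.List.pyGet? fa s).getD 0
    let d := if d.contains y then d else d.insert y []
    d.modify y [] (fun l => l ++ [s])) PySem.Dict.empty

theorem dictFold_eq (fa pr : List Int) :
    dictFold fa pr = pr.foldl (fun d s => d.modify (valOf fa s) [] (fun l => l ++ [s])) PySem.Dict.empty := by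
  unfold dictFold valOf
  simp only [modify_step]

theorem dictFold_pairs (fa pr : List Int) : dictFold fa pr
    = (pr.map (fun s => (valOf fa s, s))).foldl (fun d p => d.modify p.1 [] (fun l => l ++ [p.2])) PySem.Dict.empty := by
  rw [dictFold_eq, List.foldl_map]

theorem dictFold_getD (fa pr : List Int) (y : Int) :
    (dictFold fa pr).getD y [] = pr.filter (fun s => valOf fa s == y) := by
  rw [dictFold_pairs, PySem.Dict.getD_foldl_modify_append]
  simp [List.filter_map, Function.comp_def]

theorem dictFold_keys (fa pr : List Int) :
    (dictFold fa pr).keys = PySem.Set.ofList (pr.map (valOf fa)) := by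
  rw [dictFold_eq, PySem.Dict.keys_foldl_modify_key pr (valOf fa) [] (fun _ s => (fun l => l ++ [s]))]
  simp [PySem.Set.ofList, PySem.Set.update, PySem.Dict.keys_empty]

theorem dictFold_keys_nodup (fa pr : List Int) : (dictFold fa pr).keys.Nodup := by
  rw [dictFold_eq]
  exact PySem.Dict.nodup_keys_foldl_modify_key pr (valOf fa) [] (fun _ s => (fun l => l ++ [s])) _ (by simp)

theorem dictFold_values (fa pr : List Int) :
    (dictFold fa pr).values = ((dictFold fa pr).keys).map (fun y => pr.filter (fun s => valOf fa s == y)) := by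
  rw [PySem.Dict.values_eq_map_keys _ (dictFold_keys_nodup fa pr) []]
  exact List.map_congr_left (fun y _ => dictFold_getD fa pr y)

theorem dictFold_size (fa pr : List Int) : (dictFold fa pr).size = ((dictFold fa pr).keys).length := by
  simp [PySem.Dict.size, PySem.Dict.keys]

-- ---------- xor loop ----------
theorem xorLoop_none_iff (gs : List (List Int)) (acc : PySem.Set Int) :
    simonXorLoop gs acc = none ↔ ∃ g ∈ gs, g.length ≠ 2 := by
  induction gs generalizing acc with
  | nil => simp [simonXorLoop]
  | cons g t ih =>
    by_cases h : (g.length : Int) ≠ 2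
    · simp [simonXorLoop, h]
      exact Or.inl (by omega)
    · have h2 : g.length = 2 := by omega
      simp [simonXorLoop, ih, h2]

theorem xorLoop_some (gs : List (List Int)) (acc : PySem.Set Int)
    (h : ∀ g ∈ gs, g.length = 2) :
    simonXorLoop gs acc = some ((gs.map xr).foldl PySem.Set.add acc) := by
  induction gs generalizing acc with
  | nil => simp [simonXorLoop]
  | cons g t ih =>
    have h2 : g.length = 2 := h g (by simp)
    have : ¬ ((g.length : Int) ≠ 2) := by omega
    simp only [simonXorLoop, this, if_false, List.map_cons, List.foldl_cons]
    exact ih _ (fun g hg => h g (by simp [hg]))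

-- ---------- runs lemma ----------
theorem sorted_le_getLast {l : List Int} (hs : l.Pairwise (· ≤ ·)) (h : l ≠ []) :
    ∀ v ∈ l, v ≤ l.getLast h := by
  intro v hv
  have hd := List.dropLast_append_getLast h
  rw [← hd] at hv hs
  rcases List.mem_append.mp hv with h1 | h1
  · exact (List.pairwise_append.mp hs).2.2 v h1 _ (by simp)
  · simp at h1; omega

theorem set_add_mem (l : List Int) (a : Int) (h : a ∈ l) : PySem.Set.add l a = l := by
  simp [PySem.Set.add, PySem.Set.contains, h]
theorem set_add_not_mem (l : List Int) (a : Int) (h : ¬ a ∈ l) : PySem.Set.add l a = l ++ [a] := by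
  simp [PySem.Set.add, PySem.Set.contains, h]
theorem ofList_append_singleton (t : List Int) (a : Int) :
    PySem.Set.ofList (t ++ [a]) = PySem.Set.add (PySem.Set.ofList t) a := by
  simp [PySem.Set.ofList, List.foldl_append]

theorem ofList_getLast_sorted {l : List Int} (hs : l.Pairwise (· ≤ ·)) (h : l ≠ []) :
    (PySem.Set.ofList l : List Int).getLast? = l.getLast? := by
  induction l using List.reverseRecOn with
  | nil => simp at h
  | append_singleton t a ih =>
    rw [ofList_append_singleton]
    by_cases hmem : a ∈ (PySem.Set.ofList t : List Int)
    · have hat : a ∈ t := (PySem.Set.mem_ofList t a).mp hmem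
      have ht : t ≠ [] := by rintro rfl; simp at hat
      have hst : t.Pairwise (· ≤ ·) := (List.pairwise_append.mp hs).1
      have hmax := sorted_le_getLast hst ht a hat
      have hge : t.getLast ht ≤ a := (List.pairwise_append.mp hs).2.2 _ (List.getLast_mem ht) a (by simp)
      have heq : t.getLast ht = a := le_antisymm hge hmax
      rw [set_add_mem _ _ hmem, ih hst ht, List.getLast?_concat,
          List.getLast?_eq_some_getLast ht, heq]
    · rw [set_add_not_mem _ _ hmem, List.getLast?_concat, List.getLast?_concat]


theorem runStep_eq (fa : List Int) (ys : List Int) (x : Int) (hys : ys ≠ [])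
    (hs : List.Pairwise (fun a b => valOf fa a ≤ valOf fa b) ys)
    (hx : ∀ a ∈ ys, valOf fa a ≤ valOf fa x) :
    runStep fa ((PySem.Set.ofList (ys.map (valOf fa)) : List Int).map
        (fun y => ys.filter (fun i => valOf fa i == y))) x
      = (PySem.Set.ofList ((ys ++ [x]).map (valOf fa)) : List Int).map
        (fun y => (ys ++ [x]).filter (fun i => valOf fa i == y)) := by
  set val := valOf fa with hval
  set L := ys.map val with hL
  set S : List Int := PySem.Set.ofList L with hS
  set F : Int → List Int := fun y => ys.filter (fun i => val i == y) with hF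
  have hLne : L ≠ [] := by simpa [hL] using hys
  have hsL : L.Pairwise (· ≤ ·) := List.pairwise_map.mpr hs
  set a : Int := ys.getLast hys with ha
  have hLlast : L.getLast? = some (val a) := by
    rw [hL, List.getLast?_map, List.getLast?_eq_some_getLast hys]; rfl
  set yl : Int := val a with hyl
  have hSlast : S.getLast? = some yl := by rw [hS, ofList_getLast_sorted hsL hLne, hLlast]
  have hSne : S ≠ [] := by rintro h0; rw [h0] at hSlast; simp at hSlast
  -- last run
  have hd := List.dropLast_append_getLast hys
  have hFa : (F yl).getLast? = some a := by
    simp only [hF]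
    have h1 : List.filter (fun i => val i == yl) ys
        = List.filter (fun i => val i == yl) ys.dropLast ++ [a] := by
      conv_lhs => rw [← hd]
      rw [List.filter_append]
      simp [← ha, ← hyl]
    rw [h1, List.getLast?_concat]
  have hRlast : PySem.List.pyGet? (S.map F) (-1) = some (F yl) := by
    rw [pyGet_neg_one, List.getLast?_map, hSlast]; rfl
  -- the compared value
  have hcond : (PySem.List.pyGet? fa ((PySem.List.pyGet? (F yl) (-1)).getD 0)).getD 0 = yl := by
    rw [pyGet_neg_one, hFa]; exact hyl.symm
  -- S decomposition
  have hSd : S.dropLast ++ [yl] = S := by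
    have h1 := List.dropLast_append_getLast hSne
    have h2 : S.getLast hSne = yl := by
      have h3 := List.getLast?_eq_some_getLast hSne
      rw [h3] at hSlast
      exact Option.some_inj.mp hSlast
    rw [← h2]; exact h1
  have hnd : S.Nodup := PySem.Set.nodup_ofList L
  have hylS : yl ∈ S := by
    have := List.mem_of_getLast? (l := S) (a := yl) hSlast
    exact this
  have hyl_not : yl ∉ S.dropLast := by
    have h : (S.dropLast ++ [yl]).Nodup := by rw [hSd]; exact hnd
    simp only [List.nodup_append] at h
    exact fun hy => (h.2.2 yl hy yl (by simp)) rfl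
  have hdrop_ne : ∀ y ∈ S.dropLast, y ≠ yl := fun y hy h0 => hyl_not (h0 ▸ hy)
  have hmapF : (ys ++ [x]).map val = L ++ [val x] := by rw [List.map_append]; rfl
  have hFilt : ∀ y : Int, (ys ++ [x]).filter (fun i => val i == y)
      = F y ++ if val x = y then [x] else [] := by
    intro y
    rw [List.filter_append]
    congr 1
    by_cases hvx : val x = y
    · simp [List.filter, hvx]
    · have hb : (val x == y) = false := by simp [hvx]
      simp [List.filter, hb]
      exact hvx
  unfold runStep
  rw [hRlast]
  simp only []
  rw [hcond, show (PySem.List.pyGet? fa x).getD 0 = val x from rfl]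
  by_cases hxy : val x = yl
  · have hc : (yl == val x) = true := by simp [hxy]
    rw [hc, if_pos rfl]
    rw [hmapF, ofList_append_singleton, hxy, set_add_mem _ _ hylS]
    conv_rhs => rw [← hSd]
    rw [List.map_append]
    congr 1
    · rw [← List.map_dropLast]
      apply List.map_congr_left
      intro y hy
      rw [hFilt y, hxy, if_neg (Ne.symm (hdrop_ne y hy))]
      simp
    · simp only [List.map_cons, List.map_nil]
      rw [hFilt yl, hxy, if_pos rfl]
  · have hc : (yl == val x) = false := by simp [Ne.symm hxy]
    rw [hc]
    simp only [Bool.false_eq_true, if_false]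
    have hLlast' : L.getLast hLne = yl := by
      have h3 := List.getLast?_eq_some_getLast hLne
      rw [h3] at hLlast
      exact Option.some_inj.mp hLlast
    have hnotin : val x ∉ L := by
      intro hmem
      have h1 := sorted_le_getLast hsL hLne (val x) hmem
      rw [hLlast'] at h1
      have h2 : yl ≤ val x := by
        have := hx a (by rw [ha]; exact List.getLast_mem hys)
        simpa [← hyl] using this
      exact hxy (le_antisymm h1 h2)
    rw [hmapF, ofList_append_singleton, set_add_not_mem _ _ (by
      rw [PySem.Set.mem_ofList]; exact hnotin)]
    rw [List.map_append]
    congr 1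
    · apply List.map_congr_left
      intro y hy
      have hyL : y ∈ L := (PySem.Set.mem_ofList L y).mp hy
      have hne : val x ≠ y := fun h0 => hnotin (h0 ▸ hyL)
      rw [hFilt y, if_neg hne]
      simp
    · simp only [List.map_cons, List.map_nil]
      rw [hFilt (val x), if_pos rfl]
      have : F (val x) = [] := by
        rw [hF, List.filter_eq_nil_iff]
        intro i hi
        simp only [beq_iff_eq]
        intro h0
        exact hnotin (h0 ▸ (List.mem_map_of_mem (f := val) hi))
      rw [this]; rfl

theorem runs_eq (fa : List Int) (xs : List Int)
    (hs : List.Pairwise (fun a b => valOf fa a ≤ valOf fa b) xs) :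
    xs.foldl (runStep fa) [] =
      (PySem.Set.ofList (xs.map (valOf fa)) : List Int).map
        (fun y => xs.filter (fun i => valOf fa i == y)) := by
  induction xs using List.reverseRecOn with
  | nil => rfl
  | append_singleton ys x ih =>
    rw [List.foldl_append, List.foldl_cons, List.foldl_nil]
    have hs' : List.Pairwise (fun a b => valOf fa a ≤ valOf fa b) ys :=
      hs.sublist (List.sublist_append_left ys [x])
    by_cases hne : ys = []
    · subst hne
      simp [runStep, PySem.List.pyGet?, PySem.List.pyIdx?, PySem.Set.ofList, PySem.Set.add,
        PySem.Set.empty, List.filter]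
    · rw [ih hs', runStep_eq fa ys x hne hs'
        (fun a ha => (List.pairwise_append.mp hs).2.2 a ha x (by simp))]


-- ---------- permutation bridges ----------
theorem perm_pair' {l : List Int} (a b : Int) (h : l.Perm [a,b]) : l = [a,b] ∨ l = [b,a] := by
  have h2 : l.length = 2 := by simpa using h.length_eq
  obtain ⟨x, y, rfl⟩ := List.length_eq_two.mp h2
  have hx : x ∈ ([a,b] : List Int) := h.mem_iff.mp (by simp)
  have hy : y ∈ ([a,b] : List Int) := h.mem_iff.mp (by simp)
  simp at hx hy
  rcases hx with rfl | rfl <;> rcases hy with rfl | rfl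
  · have hb : b = y := by have hh := h.mem_iff.mpr (show b ∈ [y,b] from by simp); simpa using hh
    subst hb; simp
  · simp
  · simp
  · have ha : a = y := by have hh := h.mem_iff.mpr (show a ∈ [a,y] from by simp); simpa using hh
    subst ha; simp

theorem ofList_perm_congr {l l' : List Int} (h : l.Perm l') :
    (PySem.Set.ofList l : List Int).Perm (PySem.Set.ofList l') := by
  refine (List.perm_ext_iff_of_nodup (PySem.Set.nodup_ofList l) (PySem.Set.nodup_ofList l')).mpr ?_
  intro a; rw [PySem.Set.mem_ofList, PySem.Set.mem_ofList]; exact h.mem_iff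

theorem xr_pair (a b : Int) : xr [a, b] = PySem.Int.bxor a b := by
  simp [xr, PySem.List.pyGet?, PySem.List.pyIdx?]

theorem perm_pair_xr {g g' : List Int} (h : g.Perm g') (h2 : g.length = 2) : xr g = xr g' := by
  obtain ⟨a, b, rfl⟩ := List.length_eq_two.mp h2
  rcases perm_pair' a b h.symm with h' | h'
  · rw [h']
  · rw [h', xr_pair, xr_pair, PySem.Int.bxor_comm]

theorem zfill_empty_repeat (w : Int) : PySem.Str.zfill "" w = String.ofList (PySem.List.pyRepeat ['0'] w) := by
  simp only [PySem.Str.zfill, PySem.Chars.zfill, PySem.List.pyRepeat_singleton]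
  by_cases h : w ≤ 0
  · have h0 : w.toNat = 0 := by omega
    simp [h, h0]
  · simp [h]

theorem bfs_eq (fa : List Int) : brute_force_simon fa = brute_force_simon_alt fa := by
  by_cases hcase : (0 : Int) < (fa.length : Int) ∧ PySem.Int.band (fa.length : Int) ((fa.length : Int) - 1) = 0
  · obtain ⟨hn, hband⟩ := hcase
    have hm0 : 0 < fa.length := by exact_mod_cast hn
    have hNat : fa.length &&& (fa.length - 1) = 0 := by
      have h1 : ((fa.length : Int)) - 1 = ((fa.length - 1 : Nat) : Int) := by omega
      rw [h1, PySem.Int.band_natCast] at hband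
      exact_mod_cast hband
    have hpow : fa.length = 2 ^ Nat.log2 fa.length := and_pred_pow2 fa.length hm0 hNat
    set k := Nat.log2 fa.length with hk
    have hlen2k : ((fa.length : Nat) : Int) = ((2^k : Nat) : Int) := by exact_mod_cast hpow
    have hpown : ((2:Int))^k = (fa.length : Int) := by rw [hlen2k]; push_cast; ring
    have hpinfo : power_of_two_info (fa.length : Int) = (true, some (k : Int)) := by
      unfold power_of_two_info
      rw [if_neg (by omega), if_pos (by simp [hband])]
      simp only [Int.toNat_natCast]
      rw [hk]
    have hbl : PySem.Int.bitLength (fa.length : Int) = k + 1 := by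
      rw [hlen2k]
      exact bitLength_pow2 k
    -- reduce both sides
    rw [brute_force_simon, brute_force_simon_alt]
    rw [hpinfo]
    simp only [Option.getD_some, Int.toNat_natCast, hpown, hbl]
    have hBcond : ¬ ((decide ((fa.length : Int) ≤ 0) || (PySem.Int.band (fa.length : Int) ((fa.length : Int) - 1) != 0)) = true) := by
      simp only [hband, bne_self_eq_false, Bool.or_false, decide_eq_true_eq]
      omega
    rw [if_neg hBcond]
    rw [show (((k+1 : Nat) : Int) - 1) = (k : Int) by push_cast; ring]
    -- naming the common structures
    have hdf : (PySem.List.pyRange 0 (fa.length : Int) 1).foldl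
        (fun d s =>
          let y := (PySem.List.pyGet? fa s).getD 0
          let d := if d.contains y then d else d.insert y []
          d.modify y [] (fun l => l ++ [s])) PySem.Dict.empty = dictFold fa (vr fa) := rfl
    have hord : PySem.List.sorted (PySem.List.pyRange 0 (fa.length : Int) 1)
        (fun i => (PySem.List.pyGet? fa i).getD 0) = ordL fa := rfl
    have hrs : ∀ xs : List Int, xs.foldl
        (fun (runs : List (List Int)) (i : Int) =>
          match PySem.List.pyGet? runs (-1) with
          | some r =>
            if (PySem.List.pyGet? fa ((PySem.List.pyGet? r (-1)).getD 0)).getD 0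
                 == (PySem.List.pyGet? fa i).getD 0 then
              runs.dropLast ++ [r ++ [i]]
            else runs ++ [[i]]
          | none => runs ++ [[i]]) [] = xs.foldl (runStep fa) [] := fun _ => rfl
    rw [hdf, hord, hrs]
    -- the runs
    have hsorted : List.Pairwise (fun a b => valOf fa a ≤ valOf fa b) (ordL fa) :=
      PySem.List.sorted_pairwise (vr fa) (valOf fa)
    rw [runs_eq fa (ordL fa) hsorted]
    -- permutation facts
    have hperm : (ordL fa).Perm (vr fa) := PySem.List.sorted_perm (vr fa) (valOf fa) false
    have hKperm : (PySem.Set.ofList ((ordL fa).map (valOf fa)) : List Int).Perm (KA fa) :=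
      ofList_perm_congr (hperm.map (valOf fa))
    have hgperm : ∀ y : Int, ((ordL fa).filter (fun i => valOf fa i == y)).Perm (grpA fa y) :=
      fun y => hperm.filter _
    have hVA : (dictFold fa (vr fa)).values = (KA fa).map (fun y => grpA fa y) := by
      rw [dictFold_values, dictFold_keys]
      rfl
    have hsize : (dictFold fa (vr fa)).size = (KA fa).length := by
      rw [dictFold_size, dictFold_keys]
      rfl
    rw [hVA, hsize, List.length_map, hKperm.length_eq]
    by_cases hc1 : ((((KA fa).length : Int)) == (fa.length : Int)) = true
    · rw [if_pos hc1, if_pos hc1, zfill_empty_repeat]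
    · rw [if_neg hc1, if_neg hc1]
      by_cases hbad : ∃ g ∈ (KA fa).map (fun y => grpA fa y), g.length ≠ 2
      · have hbadB : ∃ g ∈ (PySem.Set.ofList ((ordL fa).map (valOf fa)) : List Int).map
            (fun y => (ordL fa).filter (fun i => valOf fa i == y)), g.length ≠ 2 := by
          obtain ⟨g, hg, hglen⟩ := hbad
          obtain ⟨y, hy, rfl⟩ := List.mem_map.mp hg
          refine ⟨(ordL fa).filter (fun i => valOf fa i == y), List.mem_map_of_mem (hKperm.mem_iff.mpr hy), ?_⟩
          rw [(hgperm y).length_eq]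
          exact hglen
        rw [(xorLoop_none_iff _ _).mpr hbad, (xorLoop_none_iff _ _).mpr hbadB]
      · have hall : ∀ g ∈ (KA fa).map (fun y => grpA fa y), g.length = 2 := by
          intro g hg
          by_contra hne
          exact hbad ⟨g, hg, hne⟩
        have hallB : ∀ g ∈ (PySem.Set.ofList ((ordL fa).map (valOf fa)) : List Int).map
            (fun y => (ordL fa).filter (fun i => valOf fa i == y)), g.length = 2 := by
          intro g hg
          obtain ⟨y, hy, rfl⟩ := List.mem_map.mp hg
          rw [(hgperm y).length_eq]
          exact hall _ (List.mem_map_of_mem (hKperm.mem_iff.mp hy))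
        rw [xorLoop_some _ _ hall, xorLoop_some _ _ hallB]
        have hofl : ∀ l : List Int, l.foldl PySem.Set.add PySem.Set.empty = PySem.Set.ofList l :=
          fun _ => rfl
        rw [hofl, hofl]
        dsimp only
        have hCperm : (PySem.Set.ofList ((((PySem.Set.ofList ((ordL fa).map (valOf fa)) : List Int).map
              (fun y => (ordL fa).filter (fun i => valOf fa i == y))).map xr)) : List Int).Perm
            (PySem.Set.ofList (((KA fa).map (fun y => grpA fa y)).map xr)) := by
          apply ofList_perm_congr
          rw [List.map_map, List.map_map]
          have hcongr : (PySem.Set.ofList ((ordL fa).map (valOf fa)) : List Int).map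
              (xr ∘ fun y => (ordL fa).filter (fun i => valOf fa i == y))
              = (PySem.Set.ofList ((ordL fa).map (valOf fa)) : List Int).map (xr ∘ fun y => grpA fa y) := by
            apply List.map_congr_left
            intro y hy
            have hyA : y ∈ KA fa := hKperm.mem_iff.mp hy
            have h2 : ((ordL fa).filter (fun i => valOf fa i == y)).length = 2 := by
              rw [(hgperm y).length_eq]
              exact hall _ (List.mem_map_of_mem hyA)
            exact perm_pair_xr (hgperm y) h2
          rw [hcongr]
          exact hKperm.map _
        rw [hCperm.length_eq]
        by_cases hone : (((PySem.Set.ofList (((KA fa).map (fun y => grpA fa y)).map xr) : List Int).length : Int)) ≠ 1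
        · rw [if_pos hone, if_pos hone]
        · rw [if_neg hone, if_neg hone]
          have h1 : (PySem.Set.ofList (((KA fa).map (fun y => grpA fa y)).map xr) : List Int).length = 1 := by
            omega
          obtain ⟨c, hc⟩ := List.length_eq_one_iff.mp h1
          have hCB : (PySem.Set.ofList ((((PySem.Set.ofList ((ordL fa).map (valOf fa)) : List Int).map
              (fun y => (ordL fa).filter (fun i => valOf fa i == y))).map xr)) : List Int) = [c] :=
            List.Perm.eq_singleton (hc ▸ hCperm)
          rw [hc, hCB]
  · -- not a power of two: both return the same error string
    have hp : power_of_two_info (fa.length : Int) = (false, none) := by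
      unfold power_of_two_info
      by_cases h : (fa.length : Int) ≤ 0
      · rw [if_pos h]
      · rw [if_neg h, if_neg (by
          simp only [beq_iff_eq]
          exact fun hb => hcase ⟨by omega, hb⟩)]
    rw [brute_force_simon, brute_force_simon_alt, hp]
    rw [if_pos (by
      by_cases h : (fa.length : Int) ≤ 0
      · have h0 : fa = [] := by
          have h1 : fa.length = 0 := by omega
          simpa using h1
        simp [h0]
      · have : PySem.Int.band (fa.length : Int) ((fa.length : Int) - 1) ≠ 0 :=
          fun hb => hcase ⟨by omega, hb⟩
        simp [this])]

-- ===== VERDICT (by name: the statement is the Claim_ definition above) =====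
theorem brute_force_simon_spec : Claim_equal_brute_force_simon := by
  intro farray _
  show brute_force_simon farray = brute_force_simon_alt farray
  exact bfs_eq farray
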